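-- pv_equiv track=rewrite | github.com/zaidkhan05/spring-2025-class-things | CS4306/assn4.py | largest_key_comparisons
-- ===== SOURCE A (Python) =====
-- def largest_key_comparisons(hash_table):
--     max_comparisons = 0
--     for i in range(len(hash_table)):
--         if hash_table[i] is not None:
--             comparisons = 1
--             index = (i + 1) % len(hash_table)
--             while hash_table[index] is not None:
--                 comparisons += 1
--                 index = (index + 1) % len(hash_table)
--             max_comparisons = max(max_comparisons, comparisons)
--     return max_comparisons
-- ===== SOURCE B (Python) =====
-- def largest_key_comparisons(hash_table):
--     best = 0
--     cur = 0
--     first = None  # length of the leading occupied run, recorded at the first empty slot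
--     for slot in hash_table:
--         if slot is not None:
--             cur += 1
--         else:
--             if first is None:
--                 first = cur
--             best = max(best, cur)
--             cur = 0
--     if first is None:
--         return len(hash_table)  # no empty slot at all (A does not terminate here)
--     return max(best, cur + first)  # merge trailing run with leading run (wraparound)
-- ===== Notes on version B (the rewrite author's own statement) =====
-- stated objective: faster
-- what changed: Replaces the per-slot forward wrap-scan (quadratic on dense tables) by a single linear pass that tracks run lengths and merges the trailing run with the leading run for wraparound.
import Mathlib
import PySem

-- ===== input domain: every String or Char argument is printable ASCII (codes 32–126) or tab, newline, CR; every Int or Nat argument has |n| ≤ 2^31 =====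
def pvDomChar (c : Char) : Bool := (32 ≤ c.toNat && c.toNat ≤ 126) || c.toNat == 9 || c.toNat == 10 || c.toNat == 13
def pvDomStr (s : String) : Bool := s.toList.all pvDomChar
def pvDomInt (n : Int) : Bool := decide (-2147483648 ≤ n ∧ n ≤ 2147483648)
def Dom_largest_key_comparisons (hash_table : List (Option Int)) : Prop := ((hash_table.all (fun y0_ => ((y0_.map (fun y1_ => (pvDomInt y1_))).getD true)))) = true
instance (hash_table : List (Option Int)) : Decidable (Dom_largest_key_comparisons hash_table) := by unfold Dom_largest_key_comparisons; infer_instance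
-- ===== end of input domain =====

-- B replaces A's per-slot forward wrap-scan by one linear pass over the table that
-- tracks occupied-run lengths and merges the trailing run with the leading run (objective: faster).

-- ===== PORT A =====
-- Python's inner `while` loop; every index passed here is already reduced mod len, so
-- `getD idx none` is exactly Python's `hash_table[index]`.  The fuel argument
-- (always `hash_table.length`) only makes the loop total: whenever some slot is None
-- (Pre_), the while loop stops after < length iterations, so the fuel is never exhausted.
def pvRunA (ht : List (Option Int)) : Nat → Nat → Int → Int
  | 0, _, comp => comp
  | fuel + 1, idx, comp =>
    if (ht.getD idx none).isSome then pvRunA ht fuel ((idx + 1) % ht.length) (comp + 1)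
    else comp

def largest_key_comparisons (hash_table : List (Option Int)) : Int :=
  (List.range hash_table.length).foldl
    (fun mx i =>
      if (hash_table.getD i none).isSome then
        max mx (pvRunA hash_table hash_table.length ((i + 1) % hash_table.length) 1)
      else mx) 0

-- ===== PORT B =====
-- state = (best, cur, first): best completed run, current run, leading run (set at the first None)
def pvBStep (s : Int × Int × Option Int) (slot : Option Int) : Int × Int × Option Int :=
  if slot.isSome then (s.1, s.2.1 + 1, s.2.2)
  else (max s.1 s.2.1, 0, some (s.2.2.getD s.2.1))

def largest_key_comparisons_alt (hash_table : List (Option Int)) : Int :=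
  match hash_table.foldl pvBStep (0, 0, none) with
  | (_, _, none) => (hash_table.length : Int)
  | (best, cur, some f) => max best (cur + f)

-- ===== PRECONDITION & SPEC =====
-- Pre_ excludes exactly the nonempty tables with no None slot: there Python A's
-- `while` loop never terminates (A returns on nothing outside Pre_).
def Pre_largest_key_comparisons (hash_table : List (Option Int)) : Prop :=
  hash_table = [] ∨ none ∈ hash_table
instance (hash_table : List (Option Int)) : Decidable (Pre_largest_key_comparisons hash_table) := by
  unfold Pre_largest_key_comparisons; infer_instance

def pvWitness_largest_key_comparisons : List (Option Int) := [some 1, none, some 2]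

def Spec_largest_key_comparisons (hash_table : List (Option Int)) (out : Int) : Prop := out = largest_key_comparisons_alt hash_table
instance (hash_table : List (Option Int)) (out : Int) : Decidable (Spec_largest_key_comparisons hash_table out) := by unfold Spec_largest_key_comparisons; infer_instance

-- ===== CLAIM (what is proved, stated in full; the proofs are below) =====
def Claim_equal_largest_key_comparisons : Prop := ∀ (hash_table : List (Option Int)), Dom_largest_key_comparisons hash_table → Pre_largest_key_comparisons hash_table → Spec_largest_key_comparisons hash_table (largest_key_comparisons hash_table)

-- ===== LEMMAS AND PROOFS =====

-- circular distance from idx to the first None slot, fuel-bounded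
def pvCnt (ht : List (Option Int)) : Nat → Nat → Int
  | 0, _ => 0
  | fuel + 1, idx =>
    if (ht.getD idx none).isSome then pvCnt ht fuel ((idx + 1) % ht.length) + 1 else 0

-- length of the leading occupied run, as an Int
def pvT (xs : List (Option Int)) : Int := ((xs.takeWhile Option.isSome).length : Int)

-- max over all suffixes of the leading-run length
def pvS : List (Option Int) → Int
  | [] => 0
  | x :: xs => max (pvT (x :: xs)) (pvS xs)

-- the linear max-run scan as a one-accumulator recursion
def pvG : List (Option Int) → Int → Int
  | [], cur => cur
  | x :: xs, cur => if x.isSome then pvG xs (cur + 1) else max cur (pvG xs 0)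

-- B's finalizer
def pvFin (n : Int) : Int × Int × Option Int → Int
  | (_, _, none) => n
  | (b, c, some f) => max b (c + f)

-- the common intermediate value: max over all start slots of the circular distance
def pvM (ht : List (Option Int)) : Int :=
  (List.range ht.length).foldl (fun mx i => max mx (pvCnt ht ht.length i)) 0

theorem pvRunA_eq_cnt (ht : List (Option Int)) :
    ∀ fuel idx comp, pvRunA ht fuel idx comp = comp + pvCnt ht fuel idx := by
  intro fuel
  induction fuel with
  | zero => intro idx comp; simp [pvRunA, pvCnt]
  | succ f ih =>
    intro idx comp
    simp only [pvRunA, pvCnt]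
    by_cases h : (ht.getD idx none).isSome
    · rw [if_pos h, if_pos h, ih]; ring
    · rw [if_neg h, if_neg h]; ring

theorem pvCnt_none (ht : List (Option Int)) (fuel idx : Nat)
    (h : (ht.getD idx none).isSome = false) : pvCnt ht fuel idx = 0 := by
  cases fuel with
  | zero => rfl
  | succ f =>
    show (if (ht.getD idx none).isSome = true then pvCnt ht f ((idx + 1) % ht.length) + 1 else 0) = 0
    rw [if_neg (by rw [h]; exact Bool.false_ne_true)]

theorem pvCnt_stable (ht : List (Option Int)) :
    ∀ fuel idx, idx < ht.length →
    (∃ k, k < fuel ∧ ht.getD ((idx + k) % ht.length) none = none) →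
    pvCnt ht (fuel + 1) idx = pvCnt ht fuel idx := by
  intro fuel
  induction fuel with
  | zero => intro idx _ ⟨k, hk, _⟩; omega
  | succ f ih =>
    intro idx hidx ⟨k, hk, hnone⟩
    by_cases h : (ht.getD idx none).isSome
    · have hn : 0 < ht.length := by omega
      have hkpos : k ≠ 0 := by
        intro h0; subst h0
        rw [Nat.add_zero, Nat.mod_eq_of_lt hidx] at hnone
        rw [hnone] at h
        exact absurd h (by simp)
      obtain ⟨k', rfl⟩ : ∃ k', k = k' + 1 := ⟨k - 1, by omega⟩
      have hrec : pvCnt ht (f + 1) ((idx + 1) % ht.length) = pvCnt ht f ((idx + 1) % ht.length) := by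
        apply ih
        · exact Nat.mod_lt _ hn
        · refine ⟨k', by omega, ?_⟩
          rw [Nat.mod_add_mod]
          rwa [show idx + 1 + k' = idx + (k' + 1) by omega]
      show pvCnt ht (f + 1 + 1) idx = pvCnt ht (f + 1) idx
      conv_lhs => rw [pvCnt]
      conv_rhs => rw [pvCnt]
      rw [if_pos h, if_pos h, hrec]
    · rw [pvCnt_none ht _ _ (by simpa using h), pvCnt_none ht _ _ (by simpa using h)]

theorem pvExists_none_within (ht : List (Option Int)) (hmem : none ∈ ht) :
    ∀ idx, idx < ht.length →
    ∃ k, k < ht.length ∧ ht.getD ((idx + k) % ht.length) none = none := by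
  intro idx hidx
  obtain ⟨j, hj, hjv⟩ := List.getElem_of_mem hmem
  have hn : 0 < ht.length := by omega
  refine ⟨(ht.length + j - idx) % ht.length, Nat.mod_lt _ hn, ?_⟩
  have : (idx + (ht.length + j - idx) % ht.length) % ht.length = j := by
    rw [Nat.add_mod_mod]
    have h1 : idx + (ht.length + j - idx) = ht.length + j := by omega
    rw [h1, Nat.add_mod_left, Nat.mod_eq_of_lt hj]
  rw [this, List.getD_eq_getElem _ _ hj, hjv]

theorem pvA_eq_M_aux (ht : List (Option Int)) (hmem : none ∈ ht) :
    ∀ l : List Nat, (∀ i ∈ l, i < ht.length) → ∀ mx : Int, 0 ≤ mx →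
    l.foldl (fun mx i =>
      if (ht.getD i none).isSome then
        max mx (pvRunA ht ht.length ((i + 1) % ht.length) 1)
      else mx) mx
    = l.foldl (fun mx i => max mx (pvCnt ht ht.length i)) mx := by
  intro l
  induction l with
  | nil => intro _ mx _; rfl
  | cons i l ih =>
    intro hl mx hmx
    have hi : i < ht.length := hl i (List.mem_cons_self ..)
    simp only [List.foldl_cons]
    by_cases h : (ht.getD i none).isSome
    · have hval : pvRunA ht ht.length ((i + 1) % ht.length) 1 = pvCnt ht ht.length i := by
        rw [pvRunA_eq_cnt]
        have hstep : pvCnt ht (ht.length + 1) i = pvCnt ht ht.length ((i + 1) % ht.length) + 1 := by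
          conv_lhs => rw [pvCnt]
          rw [if_pos h]
        have hstab : pvCnt ht (ht.length + 1) i = pvCnt ht ht.length i :=
          pvCnt_stable ht ht.length i hi (pvExists_none_within ht hmem i hi)
        omega
      rw [if_pos h, hval]
      exact ih (fun x hx => hl x (List.mem_cons_of_mem _ hx)) _ (le_trans hmx (le_max_left _ _))
    · rw [if_neg h, pvCnt_none ht _ _ (by simpa using h)]
      rw [max_eq_left hmx]
      exact ih (fun x hx => hl x (List.mem_cons_of_mem _ hx)) _ hmx

theorem pvA_eq_M (ht : List (Option Int)) (hmem : none ∈ ht) :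
    largest_key_comparisons ht = pvM ht := by
  unfold largest_key_comparisons pvM
  exact pvA_eq_M_aux ht hmem _ (fun i hi => List.mem_range.1 hi) 0 le_rfl

theorem pvT_cons_some (v : Int) (xs : List (Option Int)) :
    pvT (some v :: xs) = 1 + pvT xs := by
  simp only [pvT, List.takeWhile, Option.isSome_some, List.length_cons]
  push_cast
  ring

theorem pvT_cons_none (xs : List (Option Int)) : pvT ((none : Option Int) :: xs) = 0 := by
  simp [pvT, List.takeWhile]

-- linear reading of pvCnt when the LAST slot is None (no wraparound happens)
theorem pvCnt_eq_t (ht : List (Option Int))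
    (hlast : ht.getD (ht.length - 1) none = none) :
    ∀ fuel idx, idx < ht.length → ht.length - idx ≤ fuel →
    pvCnt ht fuel idx = pvT (ht.drop idx) := by
  intro fuel
  induction fuel with
  | zero => intro idx h1 h2; omega
  | succ f ih =>
    intro idx hidx hfuel
    have hdrop : ht.drop idx = ht[idx] :: ht.drop (idx + 1) := List.drop_eq_getElem_cons hidx
    have hgd : ht.getD idx none = ht[idx] := List.getD_eq_getElem _ _ hidx
    cases hx : ht[idx] with
    | none =>
      rw [pvCnt_none ht _ _ (by rw [hgd, hx]; rfl)]
      rw [hdrop, hx, pvT_cons_none]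
    | some v =>
      have hsome : (ht.getD idx none).isSome := by rw [hgd, hx]; rfl
      have hne : idx ≠ ht.length - 1 := by
        intro he
        have hv : ht.getD idx none = some v := by rw [hgd, hx]
        rw [he, hlast] at hv
        simp at hv
      have hlt : idx + 1 < ht.length := by omega
      have hmod : (idx + 1) % ht.length = idx + 1 := Nat.mod_eq_of_lt hlt
      simp only [pvCnt, hsome, if_true, hmod]
      rw [ih (idx + 1) hlt (by omega)]
      rw [hdrop, hx, pvT_cons_some]
      ring

theorem pvS_nonneg : ∀ xs : List (Option Int), 0 ≤ pvS xs := by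
  intro xs
  induction xs with
  | nil => simp [pvS]
  | cons x xs ih => simp only [pvS]; have : (0:Int) ≤ pvT (x :: xs) := by simp [pvT]
                    omega

theorem pvT_le_pvS : ∀ zs : List (Option Int), pvT zs ≤ pvS zs := by
  intro zs
  cases zs with
  | nil => simp [pvT, pvS]
  | cons x xs => exact le_max_left _ _

theorem pvS_append_ge : ∀ ys zs : List (Option Int), pvS zs ≤ pvS (ys ++ zs) := by
  intro ys zs
  induction ys with
  | nil => simp
  | cons y ys ih =>
    calc pvS zs ≤ pvS (ys ++ zs) := ih
    _ ≤ pvS (y :: (ys ++ zs)) := le_max_right _ _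

theorem pvT_allsome_concat (p : List (Option Int)) (hp : ∀ x ∈ p, x.isSome = true) :
    pvT (p ++ [none]) = (p.length : Int) := by
  induction p with
  | nil => simp [pvT_cons_none]
  | cons x p ih =>
    cases x with
    | none => have := hp none (List.mem_cons_self ..); simp at this
    | some v =>
      rw [List.cons_append, pvT_cons_some, ih (fun y hy => hp y (List.mem_cons_of_mem _ hy))]
      push_cast [List.length_cons]
      ring

theorem pvG_nonneg : ∀ (xs : List (Option Int)) (c : Int), 0 ≤ c → 0 ≤ pvG xs c := by
  intro xs
  induction xs with
  | nil => intro c hc; simpa [pvG] using hc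
  | cons x xs ih =>
    intro c hc
    cases x with
    | some v => simpa [pvG] using ih (c + 1) (by omega)
    | none =>
      have := ih 0 le_rfl
      simp only [pvG, Option.isSome_none, Bool.false_eq_true, if_false]
      omega

theorem pvG_init : ∀ (xs : List (Option Int)) (c : Int), 0 ≤ c →
    pvG xs c = max (c + pvT xs) (pvG xs 0) := by
  intro xs
  induction xs with
  | nil => intro c hc; simp [pvG, pvT]; omega
  | cons x xs ih =>
    intro c hc
    cases x with
    | some v =>
      have h1 := ih (c + 1) (by omega)
      have h2 := ih 1 (by omega)
      simp only [pvG, Option.isSome_some, if_true, pvT_cons_some]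
      rw [show (0:Int) + 1 = 1 by norm_num, h1, h2]
      omega
    | none =>
      have h0 := pvG_nonneg xs 0 le_rfl
      simp only [pvG, Option.isSome_none, Bool.false_eq_true, if_false, pvT_cons_none]
      omega

theorem pvG_zero_S : ∀ xs : List (Option Int), pvG xs 0 = pvS xs := by
  intro xs
  induction xs with
  | nil => rfl
  | cons x xs ih =>
    cases x with
    | some v =>
      simp only [pvG, Option.isSome_some, if_true, pvS]
      rw [show (0:Int) + 1 = 1 by norm_num, pvG_init xs 1 (by omega), ih, pvT_cons_some]
    | none =>
      have h0 := pvS_nonneg xs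
      simp only [pvG, Option.isSome_none, Bool.false_eq_true, if_false, pvS, pvT_cons_none, ih]

theorem pvG_allsome_concat (p : List (Option Int)) (hp : ∀ x ∈ p, x.isSome = true) :
    ∀ c : Int, 0 ≤ c → pvG (p ++ [none]) c = c + (p.length : Int) := by
  induction p with
  | nil => intro c hc; simp [pvG]; omega
  | cons x p ih =>
    intro c hc
    cases x with
    | none => have := hp none (List.mem_cons_self ..); simp at this
    | some v =>
      rw [List.cons_append]
      simp only [pvG, Option.isSome_some, if_true]
      rw [ih (fun y hy => hp y (List.mem_cons_of_mem _ hy)) (c + 1) (by omega)]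
      push_cast [List.length_cons]
      ring

-- B's fold through the leading all-occupied prefix
theorem pvBfold_allsome (p : List (Option Int)) (hp : ∀ x ∈ p, x.isSome = true) :
    ∀ (b c : Int) (f : Option Int),
    p.foldl pvBStep (b, c, f) = (b, c + (p.length : Int), f) := by
  induction p with
  | nil => intro b c f; simp
  | cons x p ih =>
    intro b c f
    cases x with
    | none => have := hp none (List.mem_cons_self ..); simp at this
    | some v =>
      rw [List.foldl_cons]
      show List.foldl pvBStep (pvBStep (b, c, f) (some v)) p = _
      simp only [pvBStep, Option.isSome_some, if_true]
      rw [ih (fun y hy => hp y (List.mem_cons_of_mem _ hy))]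
      have h2 : c + 1 + (p.length : Int) = c + (((some v :: p).length : Nat) : Int) := by
        push_cast [List.length_cons]; ring
      rw [h2]

-- B's fold after the first None: the `first` component is frozen and the scan is pvG
theorem pvBfold_main (N : Int) (P : List (Option Int)) (j : Int)
    (hP : ∀ c : Int, 0 ≤ c → pvG P c = c + j) :
    ∀ (q : List (Option Int)) (b c : Int), 0 ≤ b → 0 ≤ c →
    pvFin N (q.foldl pvBStep (b, c, some j)) = max b (pvG (q ++ P) c) := by
  intro q
  induction q with
  | nil => intro b c hb hc; simp only [List.foldl_nil, pvFin, List.nil_append]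
           rw [hP c hc]
  | cons x q ih =>
    intro b c hb hc
    rw [List.foldl_cons, List.cons_append]
    cases x with
    | some v =>
      show pvFin N (q.foldl pvBStep (pvBStep (b, c, some j) (some v))) = _
      simp only [pvBStep, Option.isSome_some, if_true, pvG]
      exact ih b (c + 1) hb (by omega)
    | none =>
      show pvFin N (q.foldl pvBStep (pvBStep (b, c, some j) none)) = _
      simp only [pvBStep, Option.isSome_none, Bool.false_eq_true, if_false, Option.getD_some, pvG]
      rw [ih (max b c) 0 (by omega) le_rfl]
      rw [max_assoc]

-- first-None decomposition of a table containing a None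
theorem pvSplit_first_none (ht : List (Option Int)) (hmem : none ∈ ht) :
    ∃ p q, ht = p ++ none :: q ∧ ∀ x ∈ p, x.isSome = true := by
  induction ht with
  | nil => simp at hmem
  | cons x xs ih =>
    cases x with
    | none => exact ⟨[], xs, rfl, by simp⟩
    | some v =>
      have hmem' : none ∈ xs := by
        rcases List.mem_cons.1 hmem with h | h
        · simp at h
        · exact h
      obtain ⟨p, q, heq, hp⟩ := ih hmem'
      exact ⟨some v :: p, q, by rw [heq]; rfl, by
        intro y hy
        rcases List.mem_cons.1 hy with rfl | hy'
        · rfl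
        · exact hp y hy'⟩

-- rotation: pointwise reading of (drop k ++ take k)
theorem pvRot_length (ht : List (Option Int)) (k : Nat) (hk : k ≤ ht.length) :
    (ht.drop k ++ ht.take k).length = ht.length := by
  simp; omega

theorem pvRot_getD (ht : List (Option Int)) (k : Nat) (hk : k ≤ ht.length)
    (i : Nat) (hi : i < ht.length) :
    (ht.drop k ++ ht.take k).getD i none = ht.getD ((i + k) % ht.length) none := by
  have hn : 0 < ht.length := by omega
  have hmod : (i + k) % ht.length < ht.length := Nat.mod_lt _ hn
  rw [List.getD_eq_getElem _ _ (by rw [pvRot_length ht k hk]; exact hi),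
      List.getD_eq_getElem _ _ hmod]
  rcases Nat.lt_or_ge i (ht.length - k) with h | h
  · rw [List.getElem_append_left (by simp only [List.length_drop]; omega)]
    rw [List.getElem_drop]
    congr 1
    rw [Nat.mod_eq_of_lt (by omega)]
    omega
  · rw [List.getElem_append_right (by simp only [List.length_drop]; omega)]
    rw [List.getElem_take]
    congr 1
    have h2 : (i + k) % ht.length = i + k - ht.length := by
      rw [Nat.mod_eq_sub_mod (by omega), Nat.mod_eq_of_lt (by omega)]
    rw [h2, List.length_drop]
    omega

theorem pvCnt_rot (ht : List (Option Int)) (k : Nat) (hk : k ≤ ht.length) :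
    ∀ fuel i, i < ht.length →
    pvCnt (ht.drop k ++ ht.take k) fuel i = pvCnt ht fuel ((i + k) % ht.length) := by
  intro fuel
  induction fuel with
  | zero => intro i _; rfl
  | succ f ih =>
    intro i hi
    have hn : 0 < ht.length := by omega
    simp only [pvCnt, pvRot_getD ht k hk i hi, pvRot_length ht k hk]
    by_cases h : (ht.getD ((i + k) % ht.length) none).isSome
    · rw [if_pos h, if_pos h, ih ((i + 1) % ht.length) (Nat.mod_lt _ hn)]
      congr 2
      rw [Nat.mod_add_mod, Nat.mod_add_mod]
      congr 1
      omega
    · rw [if_neg h, if_neg h]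

theorem pvFoldl_map_proj (g : Nat → Nat) (F : Nat → Int) :
    ∀ (l : List Nat) (b : Int),
    (l.map g).foldl (fun mx a => max mx (F a)) b = l.foldl (fun mx i => max mx (F (g i))) b := by
  intro l
  induction l with
  | nil => intro b; rfl
  | cons x l ih => intro b; simp only [List.map_cons, List.foldl_cons]; exact ih _

theorem pvFoldl_maxproj_perm (F : Nat → Int) {l₁ l₂ : List Nat} (h : l₁.Perm l₂) :
    ∀ b : Int, l₁.foldl (fun mx i => max mx (F i)) b = l₂.foldl (fun mx i => max mx (F i)) b := by
  induction h with
  | nil => intro b; rfl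
  | cons x _ ih => intro b; simp only [List.foldl_cons]; exact ih _
  | swap x y l => intro b; simp only [List.foldl_cons]; congr 1; omega
  | trans _ _ ih₁ ih₂ => intro b; rw [ih₁, ih₂]

theorem pvMap_mod_rotate (n k : Nat) :
    (List.range n).map (fun i => (i + k) % n) = (List.range n).rotate k := by
  apply List.ext_getElem
  · simp
  · intro i h1 h2
    simp only [List.getElem_map, List.getElem_range, List.getElem_rotate]
    simp only [List.length_range]
    try rw [List.getElem_range]

theorem pvM_rot (ht : List (Option Int)) (k : Nat) (hk : k ≤ ht.length) :
    pvM (ht.drop k ++ ht.take k) = pvM ht := by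
  unfold pvM
  rw [pvRot_length ht k hk]
  have h1 : (List.range ht.length).foldl
      (fun mx i => max mx (pvCnt (ht.drop k ++ ht.take k) ht.length i)) 0
      = (List.range ht.length).foldl
      (fun mx i => max mx (pvCnt ht ht.length ((i + k) % ht.length))) 0 :=
    PySem.List.foldl_congr_mem _ _ _ _ (by
      intro acc x hx
      rw [pvCnt_rot ht k hk ht.length x (List.mem_range.1 hx)])
  have h2 : (List.range ht.length).foldl
      (fun mx i => max mx (pvCnt ht ht.length ((i + k) % ht.length))) 0
      = ((List.range ht.length).map (fun i => (i + k) % ht.length)).foldl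
      (fun mx i => max mx (pvCnt ht ht.length i)) 0 :=
    (pvFoldl_map_proj (fun i => (i + k) % ht.length) (pvCnt ht ht.length) _ 0).symm
  rw [h1, h2, pvMap_mod_rotate ht.length k]
  exact pvFoldl_maxproj_perm (pvCnt ht ht.length) (List.rotate_perm (List.range ht.length) k) 0

theorem pvFoldl_range_S : ∀ (xs : List (Option Int)) (c : Int), 0 ≤ c →
    (List.range xs.length).foldl (fun mx i => max mx (pvT (xs.drop i))) c = max c (pvS xs) := by
  intro xs
  induction xs with
  | nil => intro c hc; simp [pvS]; omega
  | cons x xs ih =>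
    intro c hc
    rw [List.length_cons, List.range_succ_eq_map, List.foldl_cons,
        pvFoldl_map_proj (fun i => i + 1) (fun i => pvT ((x :: xs).drop i))]
    simp only [List.drop_zero, List.drop_succ_cons]
    rw [ih (max c (pvT (x :: xs))) (by have : (0:Int) ≤ pvT (x :: xs) := by simp [pvT]
                                       omega)]
    show max (max c (pvT (x :: xs))) (pvS xs) = max c (pvS (x :: xs))
    simp only [pvS]
    omega

-- M of a table whose last slot is None is the simple suffix max
theorem pvM_eq_S (ht : List (Option Int)) (hn : 0 < ht.length)
    (hlast : ht.getD (ht.length - 1) none = none) :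
    pvM ht = pvS ht := by
  unfold pvM
  have h1 : (List.range ht.length).foldl (fun mx i => max mx (pvCnt ht ht.length i)) 0
      = (List.range ht.length).foldl (fun mx i => max mx (pvT (ht.drop i))) 0 :=
    PySem.List.foldl_congr_mem _ _ _ _ (by
      intro acc x hx
      rw [pvCnt_eq_t ht hlast ht.length x (List.mem_range.1 hx) (by omega)])
  rw [h1, pvFoldl_range_S ht 0 le_rfl]
  have := pvS_nonneg ht
  omega

-- ===== VERDICT (by name: the statement is the Claim_ definition above) =====
theorem largest_key_comparisons_spec : Claim_equal_largest_key_comparisons := by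
  intro ht _ hpre
  unfold Spec_largest_key_comparisons
  rcases hpre with rfl | hmem
  · rfl
  · obtain ⟨p, q, rfl, hp⟩ := pvSplit_first_none _ hmem
    set ht := p ++ none :: q with hht
    have hn : 0 < ht.length := by simp [hht]
    have hlen : ht.length = p.length + 1 + q.length := by simp [hht]; omega
    -- the rotated table: q ++ (p ++ [none])
    have htake : ht.take (p.length + 1) = p ++ [none] := by
      rw [hht, List.take_append, List.take_of_length_le (by omega)]
      congr 1
      have : p.length + 1 - p.length = 1 := by omega
      rw [this]
      rfl
    have hdrop : ht.drop (p.length + 1) = q := by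
      rw [hht, List.drop_append, List.drop_of_length_le (by omega)]
      have : p.length + 1 - p.length = 1 := by omega
      rw [this]
      rfl
    have hk : p.length + 1 ≤ ht.length := by omega
    have hrot : ht.drop (p.length + 1) ++ ht.take (p.length + 1) = q ++ (p ++ [none]) := by
      rw [htake, hdrop]
    -- A side
    have hrotlast : (q ++ (p ++ [none])).getD ((q ++ (p ++ [none])).length - 1) none = none := by
      have h1 : q ++ (p ++ [none]) = (q ++ p) ++ [none] := by simp
      rw [h1]
      have h2 : ((q ++ p) ++ [none]).length - 1 = (q ++ p).length := by simp
      rw [h2, List.getD_eq_getElem _ _ (by simp)]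
      simp
    have hrotn : 0 < (q ++ (p ++ [none])).length := by simp
    have hA : largest_key_comparisons ht = pvS (q ++ (p ++ [none])) := by
      rw [pvA_eq_M ht hmem, ← pvM_rot ht (p.length + 1) hk, hrot,
          pvM_eq_S _ hrotn hrotlast]
    -- B side
    have hB : largest_key_comparisons_alt ht = pvS (q ++ (p ++ [none])) := by
      have hfold : ht.foldl pvBStep (0, 0, none) =
          q.foldl pvBStep ((p.length : Int), 0, some (p.length : Int)) := by
        rw [hht, List.foldl_append, pvBfold_allsome p hp, List.foldl_cons]
        show q.foldl pvBStep (pvBStep (0, 0 + (p.length : Int), none) none) = _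
        simp only [pvBStep, Option.isSome_none, Bool.false_eq_true, if_false, Option.getD_none]
        have h0 : max (0:Int) (0 + (p.length : Int)) = (p.length : Int) := by
          simp
        rw [h0]
        norm_num
      have halt : largest_key_comparisons_alt ht = pvFin (ht.length : Int) (ht.foldl pvBStep (0, 0, none)) := by
        unfold largest_key_comparisons_alt
        rcases hres : ht.foldl pvBStep (0, 0, none) with ⟨b, c, f⟩
        cases f <;> rfl
      rw [halt, hfold,
          pvBfold_main (ht.length : Int) (p ++ [none]) (p.length : Int)
            (fun c hc => pvG_allsome_concat p hp c hc) q (p.length : Int) 0 (by positivity) le_rfl]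
      rw [pvG_zero_S]
      have hge : (p.length : Int) ≤ pvS (q ++ (p ++ [none])) := by
        calc (p.length : Int) = pvT (p ++ [none]) := (pvT_allsome_concat p hp).symm
        _ ≤ pvS (p ++ [none]) := pvT_le_pvS _
        _ ≤ pvS (q ++ (p ++ [none])) := pvS_append_ge _ _
      omega
    rw [hA, hB]
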